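-- pv_equiv track=rewrite | github.com/dlewissandy/teaparty | projects/POC/orchestrator/learnings.py | _cluster_deltas_exact
-- ===== SOURCE A (Python) =====
-- def _cluster_deltas_exact(deltas: list[str]) -> list[tuple[str, int]]:
--     """Cluster deltas by case-insensitive exact match, return (representative, count) pairs."""
--     groups: dict[str, list[str]] = {}
--     order: list[str] = []
--     for d in deltas:
--         key = d.strip().lower()
--         if key not in groups:
--             groups[key] = []
--             order.append(key)
--         groups[key].append(d.strip())
--
--     results = []
--     for key in order:
--         members = groups[key]
--         representative = max(members, key=len)
--         results.append((representative, len(members)))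
--     return results
-- ===== SOURCE B (Python) =====
-- def _cluster_deltas_exact(deltas: list[str]) -> list[tuple[str, int]]:
--     """Cluster deltas by case-insensitive exact match, return (representative, count) pairs."""
--     recs: dict[str, tuple[str, int]] = {}  # key -> (best representative so far, count)
--     order: list[str] = []
--     for d in deltas:
--         s = d.strip()
--         key = s.lower()
--         rec = recs.get(key)
--         if rec is None:
--             recs[key] = (s, 1)
--             order.append(key)
--         else:
--             rep, c = rec
--             recs[key] = ((s if len(rep) < len(s) else rep), c + 1)
--     return [recs[key] for key in order]
-- ===== Notes on version B (the rewrite author's own statement) =====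
-- stated objective: alternative
-- what changed: Single pass maintaining per-key (running longest representative, count) records instead of collecting full member lists and doing a second max-by-length pass; strict '>' on length preserves max's first-wins tie-break.
import Mathlib
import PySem

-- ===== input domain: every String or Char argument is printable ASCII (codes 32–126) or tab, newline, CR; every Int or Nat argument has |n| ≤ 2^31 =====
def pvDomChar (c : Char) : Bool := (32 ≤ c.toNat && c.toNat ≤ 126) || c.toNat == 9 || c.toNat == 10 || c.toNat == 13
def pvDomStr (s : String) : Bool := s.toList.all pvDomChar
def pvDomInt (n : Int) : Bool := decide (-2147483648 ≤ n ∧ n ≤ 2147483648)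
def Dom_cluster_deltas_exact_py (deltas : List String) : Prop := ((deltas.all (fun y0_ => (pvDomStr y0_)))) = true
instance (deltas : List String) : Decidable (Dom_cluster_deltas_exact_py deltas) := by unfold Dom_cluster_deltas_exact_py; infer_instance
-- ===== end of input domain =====

-- B changes the decomposition: one pass keeping (running longest representative, count)
-- per key, instead of collecting full member lists plus a second max-by-length pass.

-- ===== PORT A =====
-- one iteration of A's grouping loop (state: groups dict, insertion order of the keys)
def pvStepA (st : PySem.Dict String (List String) × List String) (d : String) :
    PySem.Dict String (List String) × List String :=
  let key := PySem.Str.lower (PySem.Str.strip d)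
  let st := if st.1.contains key then st else (st.1.insert key [], st.2 ++ [key])
  (st.1.insert key (st.1.getD key [] ++ [PySem.Str.strip d]), st.2)

def cluster_deltas_exact_py (deltas : List String) : List (String × Int) :=
  let st := deltas.foldl pvStepA (PySem.Dict.empty, [])
  -- members is nonempty for every key in order, so maxD's default is never consulted
  -- (ports Python's max(members, key=len), which raises only on an empty list)
  st.2.foldl (fun results key =>
    let members := st.1.getD key []
    results ++ [(PySem.List.maxD members PySem.Str.len "", (members.length : Int))]) []

-- ===== PORT B =====
-- one iteration of B's loop (state: key -> (best representative, count), order)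
def pvStepB (st : PySem.Dict String (String × Int) × List String) (d : String) :
    PySem.Dict String (String × Int) × List String :=
  let s := PySem.Str.strip d
  let key := PySem.Str.lower s
  match st.1.get? key with
  | none => (st.1.insert key (s, 1), st.2 ++ [key])
  | some (rep, c) =>
      (st.1.insert key ((if PySem.Str.len rep < PySem.Str.len s then s else rep), c + 1), st.2)

def cluster_deltas_exact_py_alt (deltas : List String) : List (String × Int) :=
  let st := deltas.foldl pvStepB (PySem.Dict.empty, [])
  st.2.map (fun key => st.1.getD key ("", 0))

-- ===== PRECONDITION & SPEC =====
def Spec_cluster_deltas_exact_py (deltas : List String) (out : List (String × Int)) : Prop := out = cluster_deltas_exact_py_alt deltas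
instance (deltas : List String) (out : List (String × Int)) : Decidable (Spec_cluster_deltas_exact_py deltas out) := by unfold Spec_cluster_deltas_exact_py; infer_instance

-- ===== CLAIM (what is proved, stated in full; the proofs are below) =====
def Claim_equal_cluster_deltas_exact_py : Prop := ∀ (deltas : List String), Dom_cluster_deltas_exact_py deltas → Spec_cluster_deltas_exact_py deltas (cluster_deltas_exact_py deltas)

-- ===== LEMMAS AND PROOFS =====

-- B's per-key record, expressed as a function of A's per-key member list
def pvRec (ms : List String) : String × Int :=
  (PySem.List.maxD ms PySem.Str.len "", (ms.length : Int))

-- appending one element to a nonempty max-by-key fold is one strict comparison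
lemma pvMaxD_append_singleton (ms : List String) (s d : String) (h : ms ≠ []) :
    PySem.List.maxD (ms ++ [s]) PySem.Str.len d =
      (if PySem.Str.len (PySem.List.maxD ms PySem.Str.len d) < PySem.Str.len s
       then s else PySem.List.maxD ms PySem.Str.len d) := by
  obtain ⟨m, hm⟩ : ∃ m, PySem.List.max? ms PySem.Str.len = some m := by
    rcases Option.eq_none_or_eq_some (PySem.List.max? ms PySem.Str.len) with h0 | h0
    · exact absurd ((PySem.List.max?_eq_none_iff ms PySem.Str.len).mp h0) h
    · exact h0
  simp [PySem.List.maxD, PySem.List.max?, List.foldl_append] at *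
  rw [hm]
  split
  · simp_all
  · simp_all
    split <;> rfl

-- the loop invariant: from related states, the two folds keep the same order list,
-- B's dict is the pvRec-image of A's dict, and A's member lists stay nonempty
lemma pvLoop_agree (deltas : List String)
    (groups : PySem.Dict String (List String)) (recs : PySem.Dict String (String × Int))
    (order : List String)
    (hrel : ∀ k, recs.get? k = (groups.get? k).map pvRec)
    (hne : ∀ k ms, groups.get? k = some ms → ms ≠ []) :
    (deltas.foldl pvStepA (groups, order)).2 = (deltas.foldl pvStepB (recs, order)).2 ∧
    (∀ k, (deltas.foldl pvStepB (recs, order)).1.get? k =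
          ((deltas.foldl pvStepA (groups, order)).1.get? k).map pvRec) ∧
    (∀ k ms, (deltas.foldl pvStepA (groups, order)).1.get? k = some ms → ms ≠ []) := by
  induction deltas generalizing groups recs order with
  | nil => exact ⟨rfl, hrel, hne⟩
  | cons d t ih =>
      simp only [List.foldl_cons]
      set s := PySem.Str.strip d with hs
      set key := PySem.Str.lower s with hk
      rcases hg : groups.get? key with _ | ms
      · -- new key
        have hr : recs.get? key = none := by rw [hrel, hg]; rfl
        have hcon : groups.contains key = false := by
          rw [PySem.Dict.contains_eq_isSome_get?, hg]; rfl
        have hA : pvStepA (groups, order) d = (groups.insert key [s], order ++ [key]) := by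
          simp only [pvStepA, ← hs, ← hk, hcon]
          simp [PySem.Dict.getD_insert_self, PySem.Dict.insert_insert_self]
        have hB : pvStepB (recs, order) d = (recs.insert key (s, 1), order ++ [key]) := by
          simp only [pvStepB, ← hs, ← hk, hr]
        rw [hA, hB]
        apply ih
        · intro k
          by_cases hkk : k = key
          · subst hkk
            simp [PySem.Dict.get?_insert_self, pvRec, PySem.List.maxD, PySem.List.max?]
          · rw [PySem.Dict.get?_insert_of_ne _ _ hkk,
                PySem.Dict.get?_insert_of_ne _ _ hkk, hrel]
        · intro k ms' hms'
          by_cases hkk : k = key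
          · subst hkk
            rw [PySem.Dict.get?_insert_self] at hms'
            cases hms'
            simp
          · rw [PySem.Dict.get?_insert_of_ne _ _ hkk] at hms'
            exact hne _ _ hms'
      · -- existing key
        have hr : recs.get? key = some (pvRec ms) := by rw [hrel, hg]; rfl
        have hcon : groups.contains key = true := by
          rw [PySem.Dict.contains_eq_isSome_get?, hg]; rfl
        have hgd : groups.getD key [] = ms := PySem.Dict.getD_of_get?_eq_some _ _ hg
        have hA : pvStepA (groups, order) d = (groups.insert key (ms ++ [s]), order) := by
          simp only [pvStepA, ← hs, ← hk, hcon]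
          simp [hgd]
        have hmsne : ms ≠ [] := hne _ _ hg
        have hB : pvStepB (recs, order) d =
            (recs.insert key (pvRec (ms ++ [s])), order) := by
          simp only [pvStepB, ← hs, ← hk, hr, pvRec]
          rw [pvMaxD_append_singleton ms s "" hmsne]
          simp
        rw [hA, hB]
        apply ih
        · intro k
          by_cases hkk : k = key
          · subst hkk; simp [PySem.Dict.get?_insert_self]
          · rw [PySem.Dict.get?_insert_of_ne _ _ hkk,
                PySem.Dict.get?_insert_of_ne _ _ hkk, hrel]
        · intro k ms' hms'
          by_cases hkk : k = key
          · subst hkk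
            rw [PySem.Dict.get?_insert_self] at hms'
            cases hms'
            simp
          · rw [PySem.Dict.get?_insert_of_ne _ _ hkk] at hms'
            exact hne _ _ hms'

-- ===== VERDICT (by name: the statement is the Claim_ definition above) =====
theorem cluster_deltas_exact_py_spec : Claim_equal_cluster_deltas_exact_py := by
  intro deltas _
  unfold Spec_cluster_deltas_exact_py cluster_deltas_exact_py cluster_deltas_exact_py_alt
  obtain ⟨horder, hrel, -⟩ :=
    pvLoop_agree deltas PySem.Dict.empty PySem.Dict.empty []
      (by intro k; simp [PySem.Dict.get?_empty])
      (by intro k ms h; simp [PySem.Dict.get?_empty] at h)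
  rw [PySem.List.foldl_append_singleton_eq_map, horder]
  apply List.map_congr_left
  intro key _
  rw [PySem.Dict.getD_eq_get?_getD, PySem.Dict.getD_eq_get?_getD, hrel]
  rcases hg : (deltas.foldl pvStepA (PySem.Dict.empty, [])).1.get? key with _ | ms
  · simp [PySem.List.maxD, PySem.List.max?]
  · simp [pvRec]
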